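-- pv_equiv track=rewrite | github.com/pclumson1/Python3_Algorithms | prefixpalindrom.py | prefixPalindrome
-- ===== SOURCE A (Python) =====
-- def prefixPalindrome(s):
--     def prefixPalindromeHelper(s, start, end):
--         if start == end:
--             return ''
--         # start from end to find the longest palindromic prefix
--         for e in range(end, start + 1, -1):
--             if s[start:e] == s[start:e][::-1]:
--                 return prefixPalindromeHelper(s, e, end)
--         return s[start:]
--     return prefixPalindromeHelper(s, 0, len(s))
-- ===== SOURCE B (Python) =====
-- def prefixPalindrome(s):
--     n = len(s)
--     prev = [False] * n          # palindrome row for position i+1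
--     best = [0] * n              # best[i] = largest j > i with s[i:j+1] a palindrome, else i
--     for i in range(n - 1, -1, -1):
--         cur = [False] * i       # indices < i stay False
--         b = i
--         for j in range(i, n):
--             v = s[i] == s[j] and (j - i < 2 or prev[j - 1])
--             cur.append(v)
--             if v and j > i:
--                 b = j
--         prev = cur
--         best[i] = b
--     start = 0
--     while start < n:
--         b = best[start]
--         if b == start:
--             return s[start:]
--         start = b + 1
--     return ''
-- ===== Notes on version B (the rewrite author's own statement) =====
-- stated objective: alternative
-- what changed: Replaced the recursive greedy with per-candidate slice-and-reverse palindrome checks (O(n^3) comparisons) by a bottom-up palindrome DP computed row by row (keeping only the previous row) that records each position's furthest palindromic reach, followed by an iterative walk over those reaches; fewer asymptotic character comparisons (O(n^2)) but plain-Python loops, so no measured wall-clock speedup.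
import Mathlib
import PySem

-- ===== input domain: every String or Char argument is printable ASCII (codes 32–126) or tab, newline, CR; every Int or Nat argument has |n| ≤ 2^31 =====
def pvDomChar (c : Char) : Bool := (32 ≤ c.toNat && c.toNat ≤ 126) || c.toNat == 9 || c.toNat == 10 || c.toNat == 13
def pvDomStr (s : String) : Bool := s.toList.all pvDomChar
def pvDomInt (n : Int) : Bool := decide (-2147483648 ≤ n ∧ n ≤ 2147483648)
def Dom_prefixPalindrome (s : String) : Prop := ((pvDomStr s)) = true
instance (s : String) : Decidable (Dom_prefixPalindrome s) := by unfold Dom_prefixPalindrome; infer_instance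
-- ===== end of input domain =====

-- B replaces A's recursive greedy (slice-palindrome scan per candidate end) by a row-by-row
-- palindrome DP recording each position's furthest palindromic reach plus an iterative walk
-- (alternative algorithm; the RETURN value is proved equal for every string).

-- ===== PORT A =====
-- Python: range(end, start+1, -1), i.e. end, end-1, ..., start+2 (Nat arguments here; exact).
def aCands (start nd : Nat) : List Nat := (List.range' (start + 2) (nd - start - 1)).reverse

-- Python: first e with s[start:e] == s[start:e][::-1]; the slice is (drop start).take (e-start)
-- (PySem.List.slice_natCast) and [::-1] is reverse (PySem.List.slice?_none_none_neg_one).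
def aFind (s : List Char) (start : Nat) (cands : List Nat) : Option Nat :=
  cands.find? (fun e =>
    decide ((s.drop start).take (e - start) = ((s.drop start).take (e - start)).reverse))

theorem aCands_bounds {start nd e : Nat} (h : e ∈ aCands start nd) :
    start + 2 ≤ e ∧ e ≤ nd := by
  have := List.mem_range'_1.mp (List.mem_reverse.mp h)
  omega

def aHelper (s : List Char) (start nd : Nat) : List Char :=
  if start = nd then []
  else
    match h : aFind s start (aCands start nd) with
    | some e => aHelper s e nd
    | none => s.drop start
termination_by nd - start
decreasing_by
  have := aCands_bounds (List.mem_of_find?_eq_some h)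
  omega

def prefixPalindrome (s : String) : String :=
  String.mk (aHelper s.toList 0 s.toList.length)

-- ===== PORT B =====
-- inner loop of Source B: for j in range(i, n): v = s[i]==s[j] and (j-i<2 or prev[j-1]);
-- cur.append(v); if v and j > i: b = j.  (all indexing is in range, so getD is exact)
def bRow (s : List Char) (i n : Nat) (prev : List Bool) : List Bool × Nat :=
  (List.range' i (n - i)).foldl
    (fun acc j =>
      let v := (s.getD i ' ' == s.getD j ' ') && (decide (j - i < 2) || prev.getD (j - 1) false)
      (acc.1 ++ [v], if v && decide (i < j) then j else acc.2))
    (List.replicate i false, i)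

-- outer loop of Source B: i from n-1 down to 0; after k rows prev = row (n-k) and
-- best holds [b_{n-k}, …, b_{n-1}] (best[i] written as i descends = prepending).
def bSweep (s : List Char) (n : Nat) : Nat → List Bool × List Nat
  | 0 => (List.replicate n false, [])
  | k + 1 =>
    let acc := bSweep s n k
    let rb := bRow s (n - (k + 1)) n acc.1
    (rb.1, rb.2 :: acc.2)

-- while loop of Source B; fuel n+1-start bounds the iterations (start strictly increases).
def bScan (s : List Char) (best : List Nat) (n : Nat) : Nat → Nat → List Char
  | 0, _ => []
  | fuel + 1, start =>
    if start < n then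
      let b := best.getD start 0
      if b = start then s.drop start
      else bScan s best n fuel (b + 1)
    else []

def prefixPalindrome_alt (s : String) : String :=
  let t := s.toList
  let n := t.length
  String.mk (bScan t (bSweep s.toList n n).2 n (n + 1) 0)

-- ===== PRECONDITION & SPEC =====
def Spec_prefixPalindrome (s : String) (out : String) : Prop := out = prefixPalindrome_alt s
instance (s : String) (out : String) : Decidable (Spec_prefixPalindrome s out) := by unfold Spec_prefixPalindrome; infer_instance

-- ===== CLAIM (what is proved, stated in full; the proofs are below) =====
def Claim_equal_prefixPalindrome : Prop := ∀ (s : String), Dom_prefixPalindrome s → Spec_prefixPalindrome s (prefixPalindrome s)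

-- ===== LEMMAS AND PROOFS =====

-- Bool spec: s[i .. j] (inclusive) is a palindrome.
def palB (s : List Char) (i j : Nat) : Bool :=
  decide ((s.drop i).take (j + 1 - i) = ((s.drop i).take (j + 1 - i)).reverse)

theorem pal_cons_append_singleton {c d : Char} {xs : List Char} :
    ((c :: (xs ++ [d])) = (c :: (xs ++ [d])).reverse) ↔ (c = d ∧ xs = xs.reverse) := by
  simp [List.reverse_append]
  intro h _
  exact h.symm

-- palindrome DP recurrence
theorem palB_rec (s : List Char) (i j : Nat) (hij : i ≤ j) (hj : j < s.length) :
    palB s i j =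
      ((s.getD i ' ' == s.getD j ' ') && (decide (j - i < 2) || palB s (i + 1) (j - 1))) := by
  have hi : i < s.length := lt_of_le_of_lt hij hj
  have hdrop : s.drop i = s[i] :: s.drop (i + 1) := List.drop_eq_getElem_cons hi
  have hgi : s.getD i ' ' = s[i] := List.getD_eq_getElem s ' ' hi
  have hgj : s.getD j ' ' = s[j] := List.getD_eq_getElem s ' ' hj
  rcases Nat.lt_or_ge j (i + 2) with hlt | hge
  · have : j = i ∨ j = i + 1 := by omega
    rcases this with rfl | rfl
    · have h1 : j + 1 - j = 1 := by omega
      rw [palB, h1, hdrop, List.take_succ_cons, List.take_zero]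
      simp
    · have h2 : i + 1 + 1 - i = 2 := by omega
      have hdrop2 : s.drop (i + 1) = s[i+1] :: s.drop (i + 2) := by
        have := List.drop_eq_getElem_cons hj
        simpa using this
      rw [palB, h2, hdrop, List.take_succ_cons, hdrop2, List.take_succ_cons, List.take_zero]
      rw [hgi, hgj]
      by_cases h : s[i] = s[i+1] <;> simp [h]
  · have hk : j + 1 - i = (j - i - 1) + 2 := by omega
    have hrest : (s.drop (i + 1)).take (j - i) =
        (s.drop (i + 1)).take (j - i - 1) ++ [s[j]] := by
      have h1 : (s.drop (i + 1))[j - i - 1]? = some s[j] := by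
        rw [List.getElem?_drop]
        have : i + 1 + (j - i - 1) = j := by omega
        rw [this, List.getElem?_eq_getElem hj]
      have h3 := List.take_add_one (l := s.drop (i + 1)) (i := j - i - 1)
      rw [h1] at h3
      have h2 : j - i - 1 + 1 = j - i := by omega
      rw [h2] at h3
      simpa using h3
    have hsub : (s.drop i).take (j + 1 - i) =
        s[i] :: ((s.drop (i + 1)).take (j - i - 1) ++ [s[j]]) := by
      rw [hk, hdrop, List.take_succ_cons]
      have : j - i - 1 + 1 = j - i := by omega
      rw [this, hrest]
    have hmid : j - 1 + 1 - (i + 1) = j - i - 1 := by omega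
    have hd2 : decide (j - i < 2) = false := decide_eq_false (by omega)
    rw [palB, hsub, hd2, Bool.false_or, palB, hmid, hgi, hgj]
    simp only [pal_cons_append_singleton]
    by_cases h : s[i] = s[j] <;> simp [h]

-- b is correct for row i: largest palindromic reach > i, or i when none exists
def GoodB (s : List Char) (i b n : Nat) : Prop :=
  (b = i ∨ (i < b ∧ b < n ∧ palB s i b = true)) ∧
  (∀ j, i < j → j < n → b < j → palB s i j = false)

theorem le_getLast_of_pairwise {L : List Nat} (h : L.Pairwise (· < ·)) (hne : L ≠ []) :
    ∀ x ∈ L, x ≤ L.getLast hne := by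
  induction L with
  | nil => simp at hne
  | cons a t ih =>
    intro x hx
    rcases List.mem_cons.mp hx with rfl | hxt
    · cases t with
      | nil => simp
      | cons b u =>
        have h1 : x < b := (List.pairwise_cons.mp h).1 b (by simp)
        have h2 := ih (List.pairwise_cons.mp h).2 (by simp) b (by simp)
        rw [List.getLast_cons (by simp)]
        omega
    · cases t with
      | nil => simp at hxt
      | cons b u =>
        rw [List.getLast_cons (by simp)]
        exact ih (List.pairwise_cons.mp h).2 (by simp) x hxt

theorem bRow_inv (s : List Char) (i : Nat) (prev : List Bool) (hi : i < s.length)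
    (hprev : ∀ j, i + 1 ≤ j → j < s.length → prev.getD j false = palB s (i + 1) j)
    (k : Nat) (hk : i + k ≤ s.length) :
    (List.range' i k).foldl
      (fun acc j =>
        let v := (s.getD i ' ' == s.getD j ' ') && (decide (j - i < 2) || prev.getD (j - 1) false)
        (acc.1 ++ [v], if v && decide (i < j) then j else acc.2))
      (List.replicate i false, i)
    = ((List.replicate i false) ++ (List.range' i k).map (fun j => palB s i j),
       ((List.range' i k).filter (fun j => palB s i j && decide (i < j))).getLastD i) := by
  induction k with
  | zero => simp
  | succ k ih =>
    have hk' : i + k ≤ s.length := by omega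
    rw [List.range'_1_concat, List.foldl_append, ih hk']
    have hv : ((s.getD i ' ' == s.getD (i+k) ' ') && (decide ((i+k) - i < 2) || prev.getD ((i+k) - 1) false))
        = palB s i (i+k) := by
      rw [palB_rec s i (i+k) (by omega) (by omega)]
      by_cases h2 : (i+k) - i < 2
      · have hk1 : k ≤ 1 := by omega
        simp [hk1]
      · have : i + 1 ≤ (i+k) - 1 := by omega
        rw [hprev ((i+k)-1) this (by omega)]
    simp only [List.foldl_cons, List.foldl_nil, List.map_append, List.map_cons, List.map_nil,
      List.filter_append, List.filter_cons, List.filter_nil]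
    rw [hv]
    simp only [Prod.mk.injEq]
    constructor
    · simp [List.append_assoc]
    · by_cases hp : (palB s i (i+k) && decide (i < i+k)) = true
      · rw [if_pos hp, if_pos hp, List.getLastD_concat]
      · rw [if_neg hp, if_neg hp, List.append_nil]

theorem bRow_spec (s : List Char) (i : Nat) (prev : List Bool) (hi : i < s.length)
    (hprev : ∀ j, i + 1 ≤ j → j < s.length → prev.getD j false = palB s (i + 1) j) :
    (∀ j, i ≤ j → j < s.length → (bRow s i s.length prev).1.getD j false = palB s i j) ∧
    GoodB s i (bRow s i s.length prev).2 s.length := by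
  have hiv := bRow_inv s i prev hi hprev (s.length - i) (by omega)
  rw [bRow, hiv]
  constructor
  · intro j hij hj
    have hlen : (List.replicate i (false : Bool)).length = i := by simp
    rw [List.getD_eq_getElem?_getD, List.getElem?_append_right (by simp; omega)]
    simp only [List.length_replicate]
    have hji : j - i < ((List.range' i (s.length - i)).map (fun j => palB s i j)).length := by
      simp; omega
    rw [List.getElem?_eq_getElem hji]
    simp only [List.getElem_map, List.getElem_range']
    have : i + 1 * (j - i) = j := by omega
    rw [this]
    rfl
  · show GoodB s i (((List.range' i (s.length - i)).filter
        (fun j => palB s i j && decide (i < j))).getLastD i) s.length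
    generalize hL : (List.range' i (s.length - i)).filter
        (fun j => palB s i j && decide (i < j)) = L
    have hpw : L.Pairwise (· < ·) := by
      rw [← hL]
      refine List.Pairwise.filter _ ?_
      have := List.pairwise_lt_range' (s := i) (n := s.length - i) (step := 1)
      simpa using this
    have hmemL : ∀ x, x ∈ L ↔ (i ≤ x ∧ x < s.length ∧ palB s i x = true ∧ i < x) := by
      intro x
      rw [← hL, List.mem_filter, List.mem_range'_1]
      constructor
      · rintro ⟨⟨h1, h2⟩, h3⟩
        simp at h3
        exact ⟨h1, by omega, h3.1, h3.2⟩
      · rintro ⟨h1, h2, h3, h4⟩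
        exact ⟨⟨h1, by omega⟩, by simp [h3, h4]⟩
    cases L with
    | nil =>
      constructor
      · exact Or.inl rfl
      · intro j h1 h2 h3
        by_contra hcon
        have : j ∈ ([] : List Nat) := (hmemL j).mpr ⟨by omega, h2, by simpa using hcon, h1⟩
        simp at this
    | cons a t =>
      have hne : (a :: t) ≠ ([] : List Nat) := by simp
      have hlast : (a :: t).getLastD i = (a :: t).getLast hne := by
        rw [List.getLastD_eq_getLast?, List.getLast?_eq_some_getLast hne]
        rfl
      have hmem : (a :: t).getLast hne ∈ a :: t := List.getLast_mem hne
      have hprop := (hmemL _).mp hmem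
      rw [hlast]
      constructor
      · exact Or.inr ⟨hprop.2.2.2, hprop.2.1, hprop.2.2.1⟩
      · intro j h1 h2 h3
        by_contra hcon
        have hjL : j ∈ a :: t := (hmemL j).mpr ⟨by omega, h2, by simpa using hcon, h1⟩
        have := le_getLast_of_pairwise hpw hne j hjL
        omega

theorem bSweep_spec (s : List Char) (k : Nat) (hk : k ≤ s.length) :
    (∀ j, s.length - k ≤ j → j < s.length →
        (bSweep s s.length k).1.getD j false = palB s (s.length - k) j) ∧
    (bSweep s s.length k).2.length = k ∧
    (∀ t, t < k → GoodB s (s.length - k + t) ((bSweep s s.length k).2.getD t 0) s.length) := by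
  induction k with
  | zero =>
    refine ⟨fun j h1 h2 => absurd h2 (by omega), by simp [bSweep], fun t ht => absurd ht (by omega)⟩
  | succ k ih =>
    have hk' : k ≤ s.length := by omega
    obtain ⟨ihprev, ihlen, ihgood⟩ := ih hk'
    have hi : s.length - (k + 1) < s.length := by omega
    have heq : s.length - (k + 1) + 1 = s.length - k := by omega
    have hprev : ∀ j, s.length - (k + 1) + 1 ≤ j → j < s.length →
        (bSweep s s.length k).1.getD j false = palB s (s.length - (k + 1) + 1) j := by
      intro j h1 h2
      rw [heq]
      exact ihprev j (by omega) h2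
    have hrow := bRow_spec s (s.length - (k + 1)) (bSweep s s.length k).1 hi hprev
    refine ⟨?_, ?_, ?_⟩
    · intro j h1 h2
      show (bRow s (s.length - (k+1)) s.length (bSweep s s.length k).1).1.getD j false = _
      exact hrow.1 j h1 h2
    · show ((bRow s (s.length - (k+1)) s.length (bSweep s s.length k).1).2 :: (bSweep s s.length k).2).length = k + 1
      simp [ihlen]
    · intro t ht
      match t with
      | 0 =>
        show GoodB s (s.length - (k+1) + 0) (bRow s (s.length - (k+1)) s.length (bSweep s s.length k).1).2 s.length
        simpa using hrow.2
      | t' + 1 =>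
        show GoodB s (s.length - (k+1) + (t'+1)) ((bSweep s s.length k).2.getD t' 0) s.length
        have : s.length - (k + 1) + (t' + 1) = s.length - k + t' := by omega
        rw [this]
        exact ihgood t' (by omega)

theorem pred_eq_palB (s : List Char) (start e : Nat) (he : 1 ≤ e) :
    (decide ((s.drop start).take (e - start) = ((s.drop start).take (e - start)).reverse))
      = palB s start (e - 1) := by
  rw [palB]
  have : e - 1 + 1 - start = e - start := by omega
  rw [this]

theorem aFind_eq_none (s : List Char) (start : Nat)
    (hnone : ∀ j, start < j → j < s.length → palB s start j = false) :
    aFind s start (aCands start s.length) = none := by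
  rw [aFind, List.find?_eq_none]
  intro e he
  obtain ⟨h1, h2⟩ := aCands_bounds he
  rw [pred_eq_palB s start e (by omega)]
  simp [hnone (e - 1) (by omega) (by omega)]

theorem aFind_eq_some (s : List Char) (start b : Nat) (h1 : start < b) (h2 : b < s.length)
    (hb : palB s start b = true)
    (hmax : ∀ j, start < j → j < s.length → b < j → palB s start j = false) :
    aFind s start (aCands start s.length) = some (b + 1) := by
  have hsplit : List.range' (start + 2) (s.length - start - 1) =
      List.range' (start + 2) (b - start) ++ List.range' (b + 2) (s.length - b - 1) := by
    have h3 : s.length - start - 1 = (b - start) + (s.length - b - 1) := by omega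
    have h4 : b + 2 = start + 2 + (b - start) := by omega
    rw [h3, h4, ← List.range'_append_1]
  have hcands : aCands start s.length =
      (List.range' (b + 2) (s.length - b - 1)).reverse ++ (List.range' (start + 2) (b - start)).reverse := by
    rw [aCands, hsplit, List.reverse_append]
  rw [aFind, hcands, List.find?_append]
  have hfirst : (List.range' (b + 2) (s.length - b - 1)).reverse.find?
      (fun e => decide ((s.drop start).take (e - start) = ((s.drop start).take (e - start)).reverse)) = none := by
    rw [List.find?_eq_none]
    intro e he
    have := List.mem_range'_1.mp (List.mem_reverse.mp he)
    rw [pred_eq_palB s start e (by omega)]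
    simp [hmax (e - 1) (by omega) (by omega) (by omega)]
  rw [hfirst, Option.none_or]
  have hm : b - start = (b - start - 1) + 1 := by omega
  rw [hm, List.range'_1_concat, List.reverse_append]
  have hhead : start + 2 + (b - start - 1) = b + 1 := by omega
  simp only [List.reverse_cons, List.reverse_nil, List.nil_append, List.singleton_append,
    List.find?_cons, hhead]
  have : (decide ((s.drop start).take (b + 1 - start) = ((s.drop start).take (b + 1 - start)).reverse)) = true := by
    rw [pred_eq_palB s start (b + 1) (by omega)]
    simpa using hb
  rw [this]

theorem loops_agree (s : List Char) (best : List Nat)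
    (hbest : ∀ i, i < s.length → GoodB s i (best.getD i 0) s.length) :
    ∀ fuel start, start ≤ s.length → s.length + 1 - start ≤ fuel →
      aHelper s start s.length = bScan s best s.length fuel start := by
  intro fuel
  induction fuel with
  | zero => intro start h1 h2; omega
  | succ fuel ih =>
    intro start h1 h2
    by_cases hs : start = s.length
    · rw [aHelper, if_pos hs, bScan, if_neg (by omega)]
    · have hslt : start < s.length := by omega
      obtain ⟨hgb1, hgb2⟩ := hbest start hslt
      rcases hgb1 with hbi | ⟨hb1, hb2, hb3⟩
      · have hn := aFind_eq_none s start (by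
          intro j hj1 hj2
          exact hgb2 j hj1 hj2 (by omega))
        rw [aHelper, if_neg hs, hn, bScan, if_pos hslt]
        have hbi' : best[start]?.getD 0 = start := by
          simpa [List.getD_eq_getElem?_getD] using hbi
        simp [hbi']
      · have hmax : ∀ j, start < j → j < s.length → best.getD start 0 < j → palB s start j = false :=
          hgb2
        have hsm := aFind_eq_some s start (best.getD start 0) hb1 hb2 hb3 hmax
        rw [aHelper, if_neg hs, hsm, bScan, if_pos hslt]
        rw [if_neg (by omega)]
        exact ih (best.getD start 0 + 1) (by omega) (by omega)

-- ===== VERDICT (by name: the statement is the Claim_ definition above) =====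
theorem prefixPalindrome_spec : Claim_equal_prefixPalindrome := by
  intro s _
  unfold Spec_prefixPalindrome prefixPalindrome prefixPalindrome_alt
  have hs := bSweep_spec s.toList s.toList.length (le_refl _)
  have hbest : ∀ i, i < s.toList.length →
      GoodB s.toList i ((bSweep s.toList s.toList.length s.toList.length).2.getD i 0) s.toList.length := by
    intro i hi
    have := hs.2.2 i hi
    simpa using this
  have := loops_agree s.toList (bSweep s.toList s.toList.length s.toList.length).2 hbest
    (s.toList.length + 1) 0 (Nat.zero_le _) (by omega)
  exact congrArg String.mk this
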